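-- pv_equiv track=rewrite | github.com/ahmedbloul22/Project-Euler | Palyndrome.py | convenable
-- ===== SOURCE A (Python) =====
-- def convenable(item):
--     numbers = []
--     for b in range(0, 9 + 1):
--         numbers.append(str(b))
--     for c in range(0, 9 + 1):
--         if item.find(numbers[c]) != -1:
--             return False
--     if item != item.lower():
--         return False
--     return True
-- ===== SOURCE B (Python) =====
-- def convenable(item):
--     return all(not c.isdigit() and c == c.lower() for c in item)
-- ===== Notes on version B (the rewrite author's own statement) =====
-- stated objective: simpler
-- what changed: A builds the ten digit strings and scans the whole string once per digit with str.find, then compares the string with its lowercase copy; B is a single pass over the characters, checking each once for being a digit or an uppercase letter.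
import Mathlib
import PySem

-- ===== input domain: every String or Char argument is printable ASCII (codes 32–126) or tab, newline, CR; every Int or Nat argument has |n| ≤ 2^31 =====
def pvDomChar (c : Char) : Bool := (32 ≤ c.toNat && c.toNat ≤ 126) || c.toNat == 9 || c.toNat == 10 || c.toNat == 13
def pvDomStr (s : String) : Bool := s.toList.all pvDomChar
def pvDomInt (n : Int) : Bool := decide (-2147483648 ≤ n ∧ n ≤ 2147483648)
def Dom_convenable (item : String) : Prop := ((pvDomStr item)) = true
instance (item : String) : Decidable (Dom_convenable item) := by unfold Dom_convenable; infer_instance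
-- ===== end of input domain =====

-- B replaces A's ten whole-string digit scans (one `find` per digit) plus a lowercase copy
-- with a single pass testing each character once; objective: simpler.

-- ===== PORT A =====
def convenable (item : String) : Bool :=
  let numbers : List String :=
    (PySem.List.pyRange 0 10 1).foldl (fun acc b => acc ++ [PySem.Int.toStr b]) []
  if (PySem.List.pyRange 0 10 1).any
      (fun c => PySem.Str.find item ((PySem.List.pyGet? numbers c).getD "") != -1) then
    false
  else if item != PySem.Str.lower item then
    false
  else
    true

-- ===== PORT B =====
def convenable_alt (item : String) : Bool :=
  item.toList.all (fun c => !PySem.Chars.isdigit c && c == PySem.Chars.lowerChar c)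

-- ===== PRECONDITION & SPEC =====
def Spec_convenable (item : String) (out : Bool) : Prop := out = convenable_alt item
instance (item : String) (out : Bool) : Decidable (Spec_convenable item out) := by unfold Spec_convenable; infer_instance

-- ===== CLAIM (what is proved, stated in full; the proofs are below) =====
def Claim_equal_convenable : Prop := ∀ (item : String), Dom_convenable item → Spec_convenable item (convenable item)

-- ===== LEMMAS AND PROOFS =====

-- a character satisfies `isdigit` iff it is one of the ten ASCII digit characters
theorem pv_digit_mem (c : Char) : PySem.Chars.isdigit c = true ↔
    c = '0' ∨ c = '1' ∨ c = '2' ∨ c = '3' ∨ c = '4' ∨ c = '5' ∨ c = '6' ∨ c = '7' ∨ c = '8' ∨ c = '9' := by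
  have h : ∀ d : Char, c = d ↔ c.toNat = d.toNat := fun d => by
    constructor
    · rintro rfl; rfl
    · intro h; exact Char.ext (UInt32.toNat.inj h)
  simp only [PySem.Chars.isdigit, Bool.and_eq_true, decide_eq_true_eq, Char.le_def,
    UInt32.le_iff_toNat_le, h,
    show ('0').toNat = 48 from rfl, show ('1').toNat = 49 from rfl,
    show ('2').toNat = 50 from rfl, show ('3').toNat = 51 from rfl,
    show ('4').toNat = 52 from rfl, show ('5').toNat = 53 from rfl,
    show ('6').toNat = 54 from rfl, show ('7').toNat = 55 from rfl,
    show ('8').toNat = 56 from rfl, show ('9').toNat = 57 from rfl]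
  show 48 ≤ c.toNat ∧ c.toNat ≤ 57 ↔ _
  omega

theorem pv_map_eq_self {α : Type} (f : α → α) (l : List α) : l.map f = l ↔ ∀ a ∈ l, f a = a := by
  induction l with
  | nil => simp
  | cons a l ih => simp [ih]

-- A returns true iff no character is a digit and the string equals its lowercase form
theorem pv_A_iff (item : String) : convenable item = true ↔
    (∀ c ∈ item.toList, PySem.Chars.isdigit c = false) ∧ item = PySem.Str.lower item := by
  have hnum : ([0, 1, 2, 3, 4, 5, 6, 7, 8, 9] : List Int).foldl
      (fun (acc : List String) b => acc ++ [PySem.Int.toStr b]) []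
      = ["0", "1", "2", "3", "4", "5", "6", "7", "8", "9"] := by decide
  have hr : PySem.List.pyRange 0 10 1 = [0, 1, 2, 3, 4, 5, 6, 7, 8, 9] := by decide
  have hf : ∀ (s : String) (d : Char), s.toList = [d] →
      ((PySem.Str.find item s != -1) = true ↔ d ∈ item.toList) := by
    intro s d hs
    rw [bne_iff_ne, PySem.Str.find_ne_neg_one_iff, hs]
    exact List.singleton_infix_iff d item.toList
  unfold convenable
  simp only [hr, hnum, List.any_cons, List.any_nil, Bool.or_false,
    show (PySem.List.pyGet? ["0","1","2","3","4","5","6","7","8","9"] (0 : Int)).getD "" = "0" from by decide,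
    show (PySem.List.pyGet? ["0","1","2","3","4","5","6","7","8","9"] (1 : Int)).getD "" = "1" from by decide,
    show (PySem.List.pyGet? ["0","1","2","3","4","5","6","7","8","9"] (2 : Int)).getD "" = "2" from by decide,
    show (PySem.List.pyGet? ["0","1","2","3","4","5","6","7","8","9"] (3 : Int)).getD "" = "3" from by decide,
    show (PySem.List.pyGet? ["0","1","2","3","4","5","6","7","8","9"] (4 : Int)).getD "" = "4" from by decide,
    show (PySem.List.pyGet? ["0","1","2","3","4","5","6","7","8","9"] (5 : Int)).getD "" = "5" from by decide,
    show (PySem.List.pyGet? ["0","1","2","3","4","5","6","7","8","9"] (6 : Int)).getD "" = "6" from by decide,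
    show (PySem.List.pyGet? ["0","1","2","3","4","5","6","7","8","9"] (7 : Int)).getD "" = "7" from by decide,
    show (PySem.List.pyGet? ["0","1","2","3","4","5","6","7","8","9"] (8 : Int)).getD "" = "8" from by decide,
    show (PySem.List.pyGet? ["0","1","2","3","4","5","6","7","8","9"] (9 : Int)).getD "" = "9" from by decide]
  split_ifs with h1 h2
  · simp only [false_iff]
    rintro ⟨hd, _⟩
    simp only [Bool.or_eq_true] at h1
    rcases h1 with h | h | h | h | h | h | h | h | h | h <;>
      [ (have hm := (hf "0" '0' (by decide)).mp h); (have hm := (hf "1" '1' (by decide)).mp h);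
        (have hm := (hf "2" '2' (by decide)).mp h); (have hm := (hf "3" '3' (by decide)).mp h);
        (have hm := (hf "4" '4' (by decide)).mp h); (have hm := (hf "5" '5' (by decide)).mp h);
        (have hm := (hf "6" '6' (by decide)).mp h); (have hm := (hf "7" '7' (by decide)).mp h);
        (have hm := (hf "8" '8' (by decide)).mp h); (have hm := (hf "9" '9' (by decide)).mp h) ] <;>
      exact absurd (hd _ hm) (by decide)
  · simp only [false_iff]
    rintro ⟨_, heq⟩
    rw [bne_iff_ne] at h2
    exact h2 heq
  · simp only [true_iff]
    rw [bne_iff_ne, not_not] at h2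
    refine ⟨?_, h2⟩
    intro c hc
    by_contra hdig
    rw [Bool.not_eq_false, pv_digit_mem] at hdig
    apply h1
    simp only [Bool.or_eq_true]
    rcases hdig with rfl | rfl | rfl | rfl | rfl | rfl | rfl | rfl | rfl | rfl
    · exact Or.inl ((hf "0" '0' (by decide)).mpr hc)
    · exact Or.inr (Or.inl ((hf "1" '1' (by decide)).mpr hc))
    · exact Or.inr (Or.inr (Or.inl ((hf "2" '2' (by decide)).mpr hc)))
    · exact Or.inr (Or.inr (Or.inr (Or.inl ((hf "3" '3' (by decide)).mpr hc))))
    · exact Or.inr (Or.inr (Or.inr (Or.inr (Or.inl ((hf "4" '4' (by decide)).mpr hc)))))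
    · exact Or.inr (Or.inr (Or.inr (Or.inr (Or.inr (Or.inl ((hf "5" '5' (by decide)).mpr hc))))))
    · exact Or.inr (Or.inr (Or.inr (Or.inr (Or.inr (Or.inr (Or.inl ((hf "6" '6' (by decide)).mpr hc)))))))
    · exact Or.inr (Or.inr (Or.inr (Or.inr (Or.inr (Or.inr (Or.inr (Or.inl ((hf "7" '7' (by decide)).mpr hc))))))))
    · exact Or.inr (Or.inr (Or.inr (Or.inr (Or.inr (Or.inr (Or.inr (Or.inr (Or.inl ((hf "8" '8' (by decide)).mpr hc)))))))))
    · exact Or.inr (Or.inr (Or.inr (Or.inr (Or.inr (Or.inr (Or.inr (Or.inr (Or.inr ((hf "9" '9' (by decide)).mpr hc)))))))))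

-- B returns true iff each character is a non-digit, lowercase-fixed character
theorem pv_B_iff (item : String) : convenable_alt item = true ↔
    ∀ c ∈ item.toList, PySem.Chars.isdigit c = false ∧ c = PySem.Chars.lowerChar c := by
  unfold convenable_alt
  simp only [List.all_eq_true, Bool.and_eq_true, Bool.not_eq_eq_eq_not, Bool.not_true, beq_iff_eq]

-- `item == item.lower()` holds iff every character is fixed by lowercasing
theorem pv_lower_iff (item : String) :
    item = PySem.Str.lower item ↔ ∀ c ∈ item.toList, c = PySem.Chars.lowerChar c := by
  have hbridge : (PySem.Str.lower item).toList = item.toList.map PySem.Chars.lowerChar := by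
    rw [PySem.Str.toList_lower]; rfl
  rw [String.ext_iff, hbridge, eq_comm, pv_map_eq_self]
  constructor
  · intro h c hc; exact (h c hc).symm
  · intro h c hc; exact (h c hc).symm

theorem pv_main (item : String) : convenable item = convenable_alt item := by
  rw [Bool.eq_iff_iff, pv_A_iff, pv_B_iff, pv_lower_iff]
  constructor
  · rintro ⟨h1, h2⟩; exact fun c hc => ⟨h1 c hc, h2 c hc⟩
  · intro h; exact ⟨fun c hc => (h c hc).1, fun c hc => (h c hc).2⟩

-- ===== VERDICT (by name: the statement is the Claim_ definition above) =====
theorem convenable_spec : Claim_equal_convenable := by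
  intro item _
  unfold Spec_convenable
  exact pv_main item
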